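-- pv_equiv track=rewrite | github.com/liu980299/cumcuber_test_report_analysis | LogParser.py | insertByTime
-- ===== SOURCE A (Python) =====
-- def insertByTime(item_list,item,field=None):
-- 	index = len(item_list)
-- 	length = index
--
-- 	if not field:
-- 		field = "start_time"
-- 	for i in range(1, length + 1 ):
-- 		if item[field] > item_list[length - i][field]:
-- 			index = length - i + 1
-- 			break
-- 		index = length - i
-- 	if index == length:
-- 		item_list.append(item)
-- 	else:
-- 		item_list.insert(index,item)
-- 	return index
-- ===== SOURCE B (Python) =====
-- def insertByTime(item_list, item, field=None):
--     if not field: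
--         field = "start_time"
--     index = max((j + 1 for j, x in enumerate(item_list) if x[field] < item[field]), default=0)
--     item_list.insert(index, item)
--     return index
-- ===== Notes on version B (the rewrite author's own statement) =====
-- stated objective: simpler
-- what changed: Replaces the backward index-arithmetic scan with an early break by a forward comprehension taking the max of j+1 over positions whose field value is smaller than the item's, then one list.insert; return value and list mutation are identical.
-- outside the precondition, e.g. on insertByTime([{}, {'start_time': 'b'}], {'start_time': 'c'}, None): A returns 2, B raises KeyError
import Mathlib
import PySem

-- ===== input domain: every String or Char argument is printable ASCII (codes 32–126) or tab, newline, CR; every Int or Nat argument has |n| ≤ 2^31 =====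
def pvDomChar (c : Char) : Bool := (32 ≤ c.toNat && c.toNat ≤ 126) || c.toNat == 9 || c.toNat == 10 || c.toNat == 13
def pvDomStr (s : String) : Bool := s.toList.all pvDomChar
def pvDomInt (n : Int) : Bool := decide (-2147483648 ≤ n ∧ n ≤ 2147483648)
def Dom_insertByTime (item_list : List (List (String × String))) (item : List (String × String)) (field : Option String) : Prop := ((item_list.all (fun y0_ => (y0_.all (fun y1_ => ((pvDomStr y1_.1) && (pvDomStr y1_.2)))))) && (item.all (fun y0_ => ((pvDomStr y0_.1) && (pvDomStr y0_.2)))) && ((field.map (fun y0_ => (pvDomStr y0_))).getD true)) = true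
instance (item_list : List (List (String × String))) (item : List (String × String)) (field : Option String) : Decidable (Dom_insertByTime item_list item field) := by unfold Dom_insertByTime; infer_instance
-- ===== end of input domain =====

-- B replaces A's backward linear scan with break by a single forward pass keeping the last
-- position whose field value is below the item's (simpler, same cost); both mutate item_list
-- identically, equivalence proved for the returned index.


-- ===== PORT A =====
-- A's loop 'for i in range(1, length+1)' reads item_list[length-i], i.e. walks the list from
-- the right; it is transcribed as structural recursion over item_list.reverse, where at a cons
-- x :: rest the Python index length-i equals rest.length (break returns length-i+1, the final
-- fall-through value of index is 0).  Dict lookups use getD "" — Pre_ guarantees the key exists.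
def insertA_go (rev : List (List (String × String))) (f key : String) : Int :=
  match rev with
  | [] => 0
  | x :: rest =>
      if (PySem.Dict.mk x).getD f "" < key then (rest.length : Int) + 1
      else insertA_go rest f key

def insertByTime (item_list : List (List (String × String))) (item : List (String × String)) (field : Option String) : Int :=
  -- 'if not field: field = "start_time"' (None and "" are falsy)
  let f := match field with
    | none => "start_time"
    | some s => if s = "" then "start_time" else s
  insertA_go item_list.reverse f ((PySem.Dict.mk item).getD f "")

-- ===== PORT B =====
-- Source B: index = max((j+1 for j,x in enumerate(item_list) if x[field] < item[field]), default=0)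
def insertByTime_alt (item_list : List (List (String × String))) (item : List (String × String)) (field : Option String) : Int :=
  let f := match field with
    | none => "start_time"
    | some s => if s = "" then "start_time" else s
  ((PySem.List.enumerate item_list).filterMap
      (fun p => if (PySem.Dict.mk p.2).getD f "" < (PySem.Dict.mk item).getD f ""
                then some (p.1 + 1) else none)).max?.getD 0

-- ===== PRECONDITION & SPEC =====
-- Pre_ excludes inputs with a nonempty item_list where the resolved field key is missing from
-- item or from some element of item_list: A may still return there by breaking before reaching
-- the missing key, but B's forward pass reads every element's key and raises KeyError.
def Pre_insertByTime (item_list : List (List (String × String))) (item : List (String × String)) (field : Option String) : Prop :=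
  let f := match field with
    | none => "start_time"
    | some s => if s = "" then "start_time" else s
  item_list = [] ∨
    (item.any (fun p => p.1 == f) = true ∧ ∀ x ∈ item_list, x.any (fun p => p.1 == f) = true)
instance (item_list : List (List (String × String))) (item : List (String × String)) (field : Option String) : Decidable (Pre_insertByTime item_list item field) := by unfold Pre_insertByTime; infer_instance

def pvWitness_insertByTime : (List (List (String × String))) × (List (String × String)) × Option String :=
  ([[("start_time", "a")], [("start_time", "c")]], [("start_time", "b")], none)

def Spec_insertByTime (item_list : List (List (String × String))) (item : List (String × String)) (field : Option String) (out : Int) : Prop := out = insertByTime_alt item_list item field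
instance (item_list : List (List (String × String))) (item : List (String × String)) (field : Option String) (out : Int) : Decidable (Spec_insertByTime item_list item field out) := by unfold Spec_insertByTime; infer_instance

-- ===== CLAIM (what is proved, stated in full; the proofs are below) =====
def Claim_equal_insertByTime : Prop := ∀ (item_list : List (List (String × String))) (item : List (String × String)) (field : Option String), Dom_insertByTime item_list item field → Pre_insertByTime item_list item field → Spec_insertByTime item_list item field (insertByTime item_list item field)

-- ===== LEMMAS AND PROOFS =====

-- max with default 0 of a list capped by m, with m appended, is m
theorem max?_getD_concat (c : List Int) (m : Int) (h : ∀ a ∈ c, a ≤ m) :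
    ((c ++ [m]).max?).getD 0 = m := by
  induction c with
  | nil => rfl
  | cons a c ih =>
      have ham : a ≤ m := h a (List.mem_cons_self)
      have ih' := ih (fun b hb => h b (List.mem_cons_of_mem _ hb))
      cases hc : (c ++ [m]).max? with
      | none => simp at hc
      | some v =>
          rw [List.cons_append, List.max?_cons, hc]
          simp only [Option.getD_some] at ih' ⊢
          rw [hc] at ih'
          simp only [Option.getD_some] at ih'
          subst ih'
          simp [max_eq_right ham]

-- every candidate index from l is at most l.length
theorem cand_le_length (f key : String) (l : List (List (String × String))) :
    ∀ a ∈ (PySem.List.enumerate l).filterMap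
        (fun p => if (PySem.Dict.mk p.2).getD f "" < key then some (p.1 + 1) else none),
      a ≤ (l.length : Int) := by
  intro a ha
  obtain ⟨p, hp, hpa⟩ := List.mem_filterMap.mp ha
  obtain ⟨k, hk, rfl⟩ := (PySem.List.mem_enumerate_iff _ _ _).mp hp
  split at hpa
  · cases hpa; omega
  · cases hpa

-- the two scans agree: the backward scan-with-break over the reversed list computes the same
-- index as the forward max of j+1 over positions whose value is below key.
theorem insertA_go_eq_max (f key : String) (l : List (List (String × String))) :
    insertA_go l.reverse f key =
      (((PySem.List.enumerate l).filterMap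
          (fun p => if (PySem.Dict.mk p.2).getD f "" < key then some (p.1 + 1) else none)).max?).getD 0 := by
  induction l using List.reverseRecOn with
  | nil => rfl
  | append_singleton l x ih =>
      rw [List.reverse_append]
      simp only [List.reverse_cons, List.reverse_nil, List.nil_append, List.singleton_append,
        insertA_go, PySem.List.enumerate_append, List.filterMap_append]
      by_cases hx : (PySem.Dict.mk x).getD f "" < key
      · rw [if_pos hx]
        have hsing : (PySem.List.enumerate [x] ((0 : Int) + l.length)).filterMap
            (fun p => if (PySem.Dict.mk p.2).getD f "" < key then some (p.1 + 1) else none)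
            = [(l.length : Int) + 1] := by
          rw [PySem.List.enumerate_cons, PySem.List.enumerate_nil]
          simp only [List.filterMap_cons, List.filterMap_nil, if_pos hx]
          norm_num
        rw [hsing, max?_getD_concat _ _ (fun a ha => by
          have := cand_le_length f key l a ha; omega)]
        simp
      · rw [if_neg hx]
        have hnil : (PySem.List.enumerate [x] ((0 : Int) + l.length)).filterMap
            (fun p => if (PySem.Dict.mk p.2).getD f "" < key then some (p.1 + 1) else none)
            = [] := by
          rw [PySem.List.enumerate_cons, PySem.List.enumerate_nil]
          simp only [List.filterMap_cons, List.filterMap_nil, if_neg hx]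
        rw [hnil, List.append_nil, ih]

theorem pvWitness_ok :
    Dom_insertByTime pvWitness_insertByTime.1 pvWitness_insertByTime.2.1 pvWitness_insertByTime.2.2 ∧
    Pre_insertByTime pvWitness_insertByTime.1 pvWitness_insertByTime.2.1 pvWitness_insertByTime.2.2 := by
  decide

-- ===== VERDICT (by name: the statement is the Claim_ definition above) =====
theorem insertByTime_spec : Claim_equal_insertByTime := by
  intro item_list item field _ _
  unfold Spec_insertByTime insertByTime insertByTime_alt
  exact insertA_go_eq_max _ _ _
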